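-- pv_equiv track=rewrite | github.com/Gibz-nate/python_tutorials | Lists/Even Teams/main.py | split_players_into_teams
-- ===== SOURCE A (Python) =====
-- def split_players_into_teams(players):
--     even_team = []
--     odd_team = []
--     for player in range(0, len(players)):
--         if player % 2 == 0:
--             even_team.append(players[player])
--         else:
--             odd_team.append(players[player])
--     return even_team, odd_team
-- ===== SOURCE B (Python) =====
-- def split_players_into_teams(players):
--     return list(players[::2]), list(players[1::2])
-- ===== Notes on version B (the rewrite author's own statement) =====
-- stated objective: idiomatic
-- what changed: Replaces the index loop with its parity branch by two strided slices players[::2] and players[1::2], eliminating the loop and the conditional entirely.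
import Mathlib
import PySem

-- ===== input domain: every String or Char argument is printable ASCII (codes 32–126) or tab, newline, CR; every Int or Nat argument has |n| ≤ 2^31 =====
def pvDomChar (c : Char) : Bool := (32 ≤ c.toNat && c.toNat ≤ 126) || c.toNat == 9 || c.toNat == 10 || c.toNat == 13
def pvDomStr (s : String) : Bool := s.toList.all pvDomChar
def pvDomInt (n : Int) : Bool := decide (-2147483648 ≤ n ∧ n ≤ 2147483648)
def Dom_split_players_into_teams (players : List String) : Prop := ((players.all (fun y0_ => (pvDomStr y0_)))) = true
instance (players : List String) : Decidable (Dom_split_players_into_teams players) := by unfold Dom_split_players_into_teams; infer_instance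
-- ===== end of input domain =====

-- B replaces A's index loop with parity branch by two strided slices players[::2] / players[1::2] (idiomatic, no conditional).

-- ===== PORT A =====
-- loop body of A: branch on index parity, append players[player] to the matching team
-- (players[player] is always in range here, so pyGetD with a dummy default is exact)
def pvStepA (ys : List String) (acc : List String × List String) (j : Int) : List String × List String :=
  if PySem.Int.mod j 2 = 0 then (acc.1 ++ [PySem.List.pyGetD ys j ""], acc.2)
  else (acc.1, acc.2 ++ [PySem.List.pyGetD ys j ""])

def split_players_into_teams (players : List String) : List String × List String :=
  (PySem.List.pyRange 0 players.length 1).foldl (pvStepA players) ([], [])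

-- ===== PORT B =====
def split_players_into_teams_alt (players : List String) : List String × List String :=
  ((PySem.List.slice? players none none 2).getD [],
   (PySem.List.slice? players (some 1) none 2).getD [])

-- ===== PRECONDITION & SPEC =====
def Spec_split_players_into_teams (players : List String) (out : List String × List String) : Prop := out = split_players_into_teams_alt players
instance (players : List String) (out : List String × List String) : Decidable (Spec_split_players_into_teams players out) := by unfold Spec_split_players_into_teams; infer_instance

-- ===== CLAIM (what is proved, stated in full; the proofs are below) =====
def Claim_equal_split_players_into_teams : Prop := ∀ (players : List String), Dom_split_players_into_teams players → Spec_split_players_into_teams players (split_players_into_teams players)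

-- ===== LEMMAS AND PROOFS =====

-- common middle form: elements at even positions
def pvEvens : List String → List String
  | [] => []
  | [x] => [x]
  | x :: _ :: t => x :: pvEvens t

theorem pvEvens_cons (x : String) (t : List String) :
    pvEvens (x :: t) = x :: pvEvens (t.drop 1) := by
  cases t <;> simp [pvEvens]

theorem pvFoldl_acc (ys : List String) (l : List Int) (e o : List String) :
    l.foldl (pvStepA ys) (e, o) =
      (e ++ (l.foldl (pvStepA ys) ([], [])).1, o ++ (l.foldl (pvStepA ys) ([], [])).2) := by
  induction l generalizing e o with
  | nil => simp
  | cons j l ih =>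
    simp only [List.foldl_cons, pvStepA]
    by_cases h : PySem.Int.mod j 2 = 0
    · simp only [h, if_true]
      rw [ih (e ++ [PySem.List.pyGetD ys j ""]) o,
        ih (([] : List String) ++ [PySem.List.pyGetD ys j ""]) ([] : List String)]
      simp
    · simp only [h, if_false]
      rw [ih e (o ++ [PySem.List.pyGetD ys j ""]),
        ih ([] : List String) (([] : List String) ++ [PySem.List.pyGetD ys j ""])]
      simp

theorem pvShift (x y : String) (t : List String) (e o : List String) :
    (PySem.List.pyRange 2 ((t.length : Int) + 2) 1).foldl (pvStepA (x :: y :: t)) (e, o) =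
      (PySem.List.pyRange 0 (t.length : Int) 1).foldl (pvStepA t) (e, o) := by
  rw [PySem.List.pyRange_one, PySem.List.pyRange_one]
  have h1 : (((t.length : Int) + 2) - 2).toNat = t.length := by omega
  have h2 : ((t.length : Int) - 0).toNat = t.length := by omega
  rw [h1, h2, List.foldl_map, List.foldl_map]
  apply List.foldl_ext
  intro acc k _hk
  have hmod : PySem.Int.mod (2 + (k : Int)) 2 = PySem.Int.mod (0 + (k : Int)) 2 := by
    simp only [PySem.Int.mod]
    rw [Int.fmod_eq_emod, Int.fmod_eq_emod]
    simp
  have hget : PySem.List.pyGetD (x :: y :: t) (2 + (k : Int)) "" =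
      PySem.List.pyGetD t (0 + (k : Int)) "" := by
    have e1 : (2 + (k : Int)) = ((k + 2 : Nat) : Int) := by push_cast; ring
    have e2 : ((0 : Int) + (k : Int)) = ((k : Nat) : Int) := by simp
    rw [e1, e2, PySem.List.pyGetD_natCast, PySem.List.pyGetD_natCast]
    simp
  rw [hmod] at *
  simp [pvStepA, hget]

theorem pvA_eq : (xs : List String) →
    split_players_into_teams xs = (pvEvens xs, pvEvens (xs.drop 1))
  | [] => by
    simp [split_players_into_teams, pvEvens, PySem.List.pyRange_one_eq_nil]
  | [x] => by
    have h : PySem.List.pyRange (0 : Int) (1 : Int) 1 = [0] := by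
      simpa using PySem.List.pyRange_one_singleton (0 : Int)
    simp only [split_players_into_teams, List.length_cons, List.length_nil,
      Nat.cast_one, Nat.zero_add]
    norm_num [h, pvStepA, pvEvens, PySem.Int.mod, PySem.List.pyGetD,
      PySem.List.pyGet?, PySem.List.pyIdx?]
  | x :: y :: t => by
    have hn : ((x :: y :: t).length : Int) = (t.length : Int) + 2 := by
      simp; ring
    have hc1 : PySem.List.pyRange 0 ((t.length : Int) + 2) 1 =
        0 :: PySem.List.pyRange 1 ((t.length : Int) + 2) 1 :=
      PySem.List.pyRange_one_cons (by omega)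
    have hc2 : PySem.List.pyRange 1 ((t.length : Int) + 2) 1 =
        1 :: PySem.List.pyRange 2 ((t.length : Int) + 2) 1 :=
      PySem.List.pyRange_one_cons (by omega)
    have hstep0 : pvStepA (x :: y :: t) ([], []) 0 = ([x], []) := by
      simp [pvStepA, PySem.Int.mod, PySem.List.pyGetD]
    have hstep1 : pvStepA (x :: y :: t) ([x], []) 1 = ([x], [y]) := by
      simp [pvStepA, PySem.List.pyGetD, PySem.List.pyGet?, PySem.List.pyIdx?]
    have ih := pvA_eq t
    calc split_players_into_teams (x :: y :: t)
        = (PySem.List.pyRange 2 ((t.length : Int) + 2) 1).foldl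
            (pvStepA (x :: y :: t)) ([x], [y]) := by
          simp only [split_players_into_teams, hn, hc1, hc2, List.foldl_cons,
            hstep0, hstep1]
      _ = (PySem.List.pyRange 0 (t.length : Int) 1).foldl (pvStepA t) ([x], [y]) :=
          pvShift x y t [x] [y]
      _ = ([x] ++ (split_players_into_teams t).1, [y] ++ (split_players_into_teams t).2) := by
          rw [pvFoldl_acc]; rfl
      _ = (pvEvens (x :: y :: t), pvEvens ((x :: y :: t).drop 1)) := by
          rw [ih]
          simp [pvEvens, pvEvens_cons]

theorem pvFM : (xs : List String) → ∀ (m : Nat),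
    List.filterMap (fun k => xs[2 * k]?) (List.range m) = pvEvens (xs.take (2 * m))
  | xs, 0 => by simp [pvEvens]
  | [], m => by
    simp [pvEvens]
  | [x], m + 1 => by
    rw [List.range_succ_eq_map, List.filterMap_cons, List.filterMap_map]
    simp only [Function.comp]
    simp [pvEvens, List.take_of_length_le,
      show (1 : Nat) ≤ 2 * (m + 1) by omega]
  | x :: y :: t, m + 1 => by
    rw [List.range_succ_eq_map, List.filterMap_cons, List.filterMap_map]
    have hf : ∀ k : Nat, (x :: y :: t)[2 * (k + 1)]? = t[2 * k]? := by
      intro k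
      have h2 : 2 * (k + 1) = (2 * k) + 1 + 1 := by omega
      rw [h2]; simp
    have ih := pvFM t m
    simp only [Function.comp]
    simp only [hf]
    have h3 : 2 * (m + 1) = (2 * m) + 1 + 1 := by omega
    simp [ih, h3, pvEvens]

theorem pvB_even (xs : List String) :
    (PySem.List.slice? xs none none 2).getD [] = pvEvens xs := by
  simp only [PySem.List.slice?, PySem.List.sliceIndices]
  norm_num
  have hif : (if 0 < xs.length then (((xs.length : Int) + 2 - 1) / 2).toNat else 0)
      = (xs.length + 1) / 2 := by
    by_cases h : 0 < xs.length
    · rw [if_pos h]; omega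
    · rw [if_neg h]; omega
  have hidx : ∀ k : Nat, ((2 * (k : Int)).toNat) = 2 * k := by intro k; omega
  simp only [hif, hidx]
  rw [pvFM]
  congr 1
  exact List.take_of_length_le (by omega)

theorem pvB_odd (xs : List String) :
    (PySem.List.slice? xs (some 1) none 2).getD [] = pvEvens (xs.drop 1) := by
  simp only [PySem.List.slice?, PySem.List.sliceIndices]
  norm_num
  cases xs with
  | nil => simp [pvEvens]
  | cons a t =>
    have hmin : min (1 : Int) (((a :: t).length : Int)) = 1 := by
      simp only [List.length_cons]; omega
    have hif : (if 1 < (a :: t).length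
        then ((((a :: t).length : Int) - min (1 : Int) (((a :: t).length : Int)) + 2 - 1) / 2).toNat
        else 0) = t.length / 2 + t.length % 2 := by
      rw [hmin]
      simp only [List.length_cons]
      by_cases h : 1 < t.length + 1
      · rw [if_pos h]; push_cast; omega
      · rw [if_neg h]; omega
    have hidx : ∀ k : Nat,
        (a :: t)[(min (1 : Int) (((a :: t).length : Int)) + 2 * (k : Int)).toNat]? = t[2 * k]? := by
      intro k
      rw [hmin]
      have : ((1 : Int) + 2 * (k : Int)).toNat = 2 * k + 1 := by omega
      rw [this]
      simp
    simp only [hif, hidx]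
    rw [pvFM]
    simp only [List.tail_cons]
    congr 1
    exact List.take_of_length_le (by omega)

theorem pvAlt_eq (xs : List String) :
    split_players_into_teams_alt xs = (pvEvens xs, pvEvens (xs.drop 1)) := by
  rw [split_players_into_teams_alt, pvB_even, pvB_odd]

-- ===== VERDICT (by name: the statement is the Claim_ definition above) =====
theorem split_players_into_teams_spec : Claim_equal_split_players_into_teams := by
  intro players _
  unfold Spec_split_players_into_teams
  rw [pvA_eq, pvAlt_eq]
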